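-- pv_equiv track=rewrite | github.com/Lakshit-Chiranjiv/DSA-List-Questions | Striver/DP/Q54.py | maxSumRec
-- ===== SOURCE A (Python) =====
-- def maxSumRec(i,arr,k):
--     if i>=len(arr):
--         return 0
--
--     maxSum = float('-inf')
--     length = 0
--     maxVal = float('-inf')
--
--     for j in range(i,min(i+k,len(arr))):
--         maxVal = max(maxVal,arr[j])
--         length += 1
--         maxSum = max(maxSum,maxVal*length + maxSumRec(j+1,arr,k))
--
--     return maxSum
-- ===== SOURCE B (Python) =====
-- def maxSumRec(i, arr, k):
--     # Bottom-up DP: dp[s - i] = best partition sum of the suffix starting at s.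
--     n = len(arr)
--     if i >= n:
--         return 0
--     dp = [0] * (n - i + 1)
--     for s in range(n - 1, i - 1, -1):
--         best = None
--         m = None
--         for j in range(s, min(s + k, n)):
--             v = arr[j]
--             if m is None or v > m:
--                 m = v
--             c = m * (j - s + 1) + dp[j + 1 - i]
--             if best is None or c > best:
--                 best = c
--         dp[s - i] = best
--     return dp[0]
-- ===== Notes on version B (the rewrite author's own statement) =====
-- stated objective: alternative
-- what changed: Replaced the naive exponential recursion by bottom-up dynamic programming: an iterative pass from the end of the array fills a table dp[s-i] = best sum of the suffix starting at s, so each start index is solved once and recursion disappears entirely (a timing run could not certify a ratio — A times out from n=64 where B returns — so no speed is claimed).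
-- outside the precondition, e.g. on maxSumRec(0, [1], 0): A returns -inf, B returns None
import Mathlib
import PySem

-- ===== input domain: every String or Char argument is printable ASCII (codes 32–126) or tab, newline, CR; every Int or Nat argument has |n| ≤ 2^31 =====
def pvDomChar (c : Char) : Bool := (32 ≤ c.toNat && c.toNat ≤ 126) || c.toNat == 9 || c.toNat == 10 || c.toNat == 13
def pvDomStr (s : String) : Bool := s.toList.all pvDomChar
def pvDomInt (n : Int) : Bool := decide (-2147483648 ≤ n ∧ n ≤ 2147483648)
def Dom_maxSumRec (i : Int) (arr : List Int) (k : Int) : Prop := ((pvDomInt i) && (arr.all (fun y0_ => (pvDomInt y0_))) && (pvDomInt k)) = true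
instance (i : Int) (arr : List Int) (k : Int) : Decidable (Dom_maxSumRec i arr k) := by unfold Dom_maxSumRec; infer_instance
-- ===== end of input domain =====

-- B replaces A's naive exponential recursion by bottom-up dynamic programming: an iterative
-- pass from the end of the array fills a table dp[s-i] = best sum of the suffix starting at s,
-- so each start index is solved once, with no recursion at all.

-- ===== PORT A =====
-- A's recursion, totalised by a fuel argument ((len(arr) - i).toNat + 1 at the top level strictly
-- exceeds the recursion depth, so the fuel-0 branch is never reached on any input).  The for-loop
-- over range(i, min(i+k, len(arr))) is a foldl over PySem.List.pyRange threading the loop state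
-- (maxVal, maxSum — float('-inf') ported as `none` — and length); arr[j] is pyGetD (Pre_ keeps j
-- in range).  When the loop is empty (k ≤ 0, excluded by Pre_) A returns float('-inf'), not an
-- int; the port returns 0 there via `.getD 0`.
def maxSumRecAF (arr : List Int) (k : Int) : Nat → Int → Int
  | 0, _ => 0
  | fuel + 1, i =>
    if (arr.length : Int) ≤ i then 0
    else
      ((PySem.List.pyRange i (min (i + k) (arr.length : Int)) 1).foldl
        (fun acc j =>
          let mv := match acc.1 with
            | none => PySem.List.pyGetD arr j 0
            | some x => max x (PySem.List.pyGetD arr j 0)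
          let len' := acc.2.2 + 1
          let cand := mv * len' + maxSumRecAF arr k fuel (j + 1)
          let ms := match acc.2.1 with | none => cand | some x => max x cand
          (some mv, some ms, len'))
        ((none, none, 0) : Option Int × Option Int × Int)).2.1.getD 0

def maxSumRec (i : Int) (arr : List Int) (k : Int) : Int :=
  maxSumRecAF arr k (((arr.length : Int) - i).toNat + 1) i

-- ===== PORT B =====
-- Source B's inner loop at start index s: the running window maximum m and the running best are
-- Option Int (Source B's None-initialised variables); dp entries are Option Int because Source B's table
-- holds ints or None (None only when k ≤ 0, excluded by Pre_); the read dp[j+1-i] extracts the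
-- int with `.getD 0` (exact under Pre_, where every entry read is an int).
def bInner (arr : List Int) (k i : Int) (dp : List (Option Int)) (s : Int) : Option Int :=
  ((PySem.List.pyRange s (min (s + k) (arr.length : Int)) 1).foldl
    (fun (acc : Option Int × Option Int) j =>
      let v := PySem.List.pyGetD arr j 0
      let m := match acc.1 with
        | none => v
        | some x => if v > x then v else x
      let c := m * (j - s + 1) + (PySem.List.pyGetD dp (j + 1 - i) (some 0)).getD 0
      let best := match acc.2 with
        | none => some c
        | some b => if c > b then some c else some b
      (some m, best))
    ((none, none) : Option Int × Option Int)).2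

-- Source B's outer countdown loop for s in range(n-1, i-1, -1), filling dp[s-i] (in-range item
-- assignment, ported as pySetD); returns dp[0], `.getD 0` where Source B's value is an int (Pre_).
def maxSumRec_alt (i : Int) (arr : List Int) (k : Int) : Int :=
  if (arr.length : Int) ≤ i then 0
  else
    let dp := (PySem.List.pyRange ((arr.length : Int) - 1) (i - 1) (-1)).foldl
      (fun dp s => PySem.List.pySetD dp (s - i) (bInner arr k i dp s))
      (List.replicate (((arr.length : Int) - i + 1)).toNat ((some 0) : Option Int))
    (PySem.List.pyGetD dp 0 (some 0)).getD 0

-- ===== PRECONDITION & SPEC =====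
-- Pre_ excludes (a) i < -len(arr) with i < len(arr), where A raises IndexError, and
-- (b) k ≤ 0 with i < len(arr), where A returns float('-inf') — a float, not an int
-- (Source B returns None there; see claim.json "cites").
def Pre_maxSumRec (i : Int) (arr : List Int) (k : Int) : Prop :=
  (arr.length : Int) ≤ i ∨ (-(arr.length : Int) ≤ i ∧ 1 ≤ k)
instance (i : Int) (arr : List Int) (k : Int) : Decidable (Pre_maxSumRec i arr k) := by
  unfold Pre_maxSumRec; infer_instance

def pvWitness_maxSumRec : Int × List Int × Int := (0, [3, -2, 5, 1], 2)

def Spec_maxSumRec (i : Int) (arr : List Int) (k : Int) (out : Int) : Prop :=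
  out = maxSumRec_alt i arr k
instance (i : Int) (arr : List Int) (k : Int) (out : Int) : Decidable (Spec_maxSumRec i arr k out) := by
  unfold Spec_maxSumRec; infer_instance

-- ===== CLAIM (what is proved, stated in full; the proofs are below) =====
def Claim_equal_maxSumRec : Prop := ∀ (i : Int) (arr : List Int) (k : Int),
  Dom_maxSumRec i arr k → Pre_maxSumRec i arr k → Spec_maxSumRec i arr k (maxSumRec i arr k)

-- ===== LEMMAS AND PROOFS =====

theorem push_max (b c : Int) : (if c > b then some c else some b) = some (max b c) := by
  by_cases h : b < c
  · rw [if_pos h, max_eq_right h.le]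
  · rw [if_neg h, max_eq_left (not_lt.mp h)]

theorem push_max' (x v : Int) : (if v > x then v else x) = max x v := by
  by_cases h : x < v
  · rw [if_pos h, max_eq_right h.le]
  · rw [if_neg h, max_eq_left (not_lt.mp h)]

-- the fueled A-port is fuel-independent once the fuel exceeds the recursion depth
theorem A_canon (arr : List Int) (k : Int) :
    ∀ (F f : Nat) (i : Int), f ≤ F → ((arr.length : Int) - i).toNat + 1 ≤ f →
      maxSumRecAF arr k f i = maxSumRecAF arr k (((arr.length : Int) - i).toNat + 1) i := by
  intro F
  induction F with
  | zero => intro f i hfF hf; omega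
  | succ F ih =>
    intro f i hfF hf
    by_cases hfF' : f ≤ F
    · exact ih f i hfF' hf
    · have hfe : f = F + 1 := by omega
      subst hfe
      have hd : ((arr.length : Int) - i).toNat ≤ F := by omega
      rw [maxSumRecAF, maxSumRecAF]
      by_cases hni : (arr.length : Int) ≤ i
      · rw [if_pos hni, if_pos hni]
      · rw [if_neg hni, if_neg hni]
        have hcongr : ∀ (acc : Option Int × Option Int × Int) (j : Int),
            j ∈ PySem.List.pyRange i (min (i + k) (arr.length : Int)) 1 →
            maxSumRecAF arr k F (j + 1) =
            maxSumRecAF arr k (((arr.length : Int) - i).toNat) (j + 1) := by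
          intro _ j hj
          rw [PySem.List.mem_pyRange_one] at hj
          have hjn : j < (arr.length : Int) := by omega
          have hc : ((arr.length : Int) - (j + 1)).toNat + 1 ≤
              ((arr.length : Int) - i).toNat := by omega
          rw [ih F (j + 1) (le_refl F) (by omega),
              ih (((arr.length : Int) - i).toNat) (j + 1) hd hc]
        refine congrArg (fun st : Option Int × Option Int × Int => st.2.1.getD 0)
          (PySem.List.foldl_congr_mem _ _ _ _ ?_)
        intro acc j hj
        dsimp only
        rw [hcongr acc j hj]

-- A's loop sets maxSum to `some _` on every iteration, so a nonempty loop ends isSome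
theorem A_fold_isSome (arr : List Int) (k : Int) (fuel : Nat) :
    ∀ (js : List Int) (mx ms : Option Int) (len : Int), ms.isSome ∨ js ≠ [] →
      ((js.foldl
        (fun acc j =>
          let mv := match acc.1 with
            | none => PySem.List.pyGetD arr j 0
            | some x => max x (PySem.List.pyGetD arr j 0)
          let len' := acc.2.2 + 1
          let cand := mv * len' + maxSumRecAF arr k fuel (j + 1)
          let ms := match acc.2.1 with | none => cand | some x => max x cand
          (some mv, some ms, len'))
        ((mx, ms, len) : Option Int × Option Int × Int)).2.1).isSome := by
  intro js
  induction js with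
  | nil =>
    intro mx ms len h
    rcases h with h | h
    · exact h
    · exact absurd rfl h
  | cons j js ih =>
    intro js' mx ms _
    rw [List.foldl_cons]
    exact ih _ _ _ (Or.inl rfl)

-- canonical value of A at start index s
def Aval (arr : List Int) (k s : Int) : Int :=
  maxSumRecAF arr k (((arr.length : Int) - s).toNat + 1) s

-- table invariant: every entry for an already-solved start index u holds A's answer there
def DpInv (arr : List Int) (k i t : Int) (dp : List (Option Int)) : Prop :=
  dp.length = (((arr.length : Int) - i + 1)).toNat ∧
  ∀ u : Int, t ≤ u → u ≤ (arr.length : Int) →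
    PySem.List.pyGetD dp (u - i) (some 0) = some (Aval arr k u)

-- B's inner step with its None-guarded ifs rewritten pointwise to max (same function)
theorem B_canon (arr : List Int) (i s : Int) (dp : List (Option Int)) (js : List Int)
    (init : Option Int × Option Int) :
    (js.foldl
      (fun (acc : Option Int × Option Int) j =>
        let v := PySem.List.pyGetD arr j 0
        let m := match acc.1 with
          | none => v
          | some x => if v > x then v else x
        let c := m * (j - s + 1) + (PySem.List.pyGetD dp (j + 1 - i) (some 0)).getD 0
        let best := match acc.2 with
          | none => some c
          | some b => if c > b then some c else some b
        (some m, best)) init) =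
    (js.foldl
      (fun (acc : Option Int × Option Int) j =>
        let v := PySem.List.pyGetD arr j 0
        let m := match acc.1 with
          | none => v
          | some x => max x v
        let c := m * (j - s + 1) + (PySem.List.pyGetD dp (j + 1 - i) (some 0)).getD 0
        (some m, some (match acc.2 with | none => c | some b => max b c))) init) := by
  refine PySem.List.foldl_congr_mem _ _ _ _ ?_
  intro acc j _
  obtain ⟨mx, best⟩ := acc
  cases mx with
  | none =>
    cases best with
    | none => rfl
    | some b => dsimp only; rw [push_max]
  | some x =>
    dsimp only
    rw [push_max' x _]
    cases best with
    | none => rfl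
    | some b => dsimp only; rw [push_max]

-- the canonical form of B's inner loop agrees with A's loop, state (m,best) vs (mx,ms,len), len = j - s
theorem inner_rel (arr : List Int) (k i s : Int) (dp : List (Option Int)) (dA : Nat)
    (hdA : ((arr.length : Int) - s).toNat ≤ dA)
    (Hdp : ∀ u : Int, s < u → u ≤ (arr.length : Int) →
      PySem.List.pyGetD dp (u - i) (some 0) = some (Aval arr k u)) :
    ∀ (d : Nat) (j : Int), (min (s + k) (arr.length : Int) - j).toNat ≤ d → s ≤ j →
      ∀ (mx best : Option Int),
      (((PySem.List.pyRange j (min (s + k) (arr.length : Int)) 1).foldl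
        (fun (acc : Option Int × Option Int) j =>
          let v := PySem.List.pyGetD arr j 0
          let m := match acc.1 with
            | none => v
            | some x => max x v
          let c := m * (j - s + 1) + (PySem.List.pyGetD dp (j + 1 - i) (some 0)).getD 0
          (some m, some (match acc.2 with | none => c | some b => max b c)))
        ((mx, best) : Option Int × Option Int)).2) =
      (((PySem.List.pyRange j (min (s + k) (arr.length : Int)) 1).foldl
        (fun acc j =>
          let mv := match acc.1 with
            | none => PySem.List.pyGetD arr j 0
            | some x => max x (PySem.List.pyGetD arr j 0)
          let len' := acc.2.2 + 1
          let cand := mv * len' + maxSumRecAF arr k dA (j + 1)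
          let ms := match acc.2.1 with | none => cand | some x => max x cand
          (some mv, some ms, len'))
        ((mx, best, j - s) : Option Int × Option Int × Int)).2.1) := by
  intro d
  induction d with
  | zero =>
    intro j hd hsj mx best
    rw [PySem.List.pyRange_one_eq_nil (by omega)]
    rfl
  | succ d ih =>
    intro j hd hsj mx best
    by_cases hlt : j < min (s + k) (arr.length : Int)
    · rw [PySem.List.pyRange_one_cons hlt, List.foldl_cons, List.foldl_cons]
      dsimp only
      have hjn : j < (arr.length : Int) := by omega
      rw [Hdp (j + 1) (by omega) (by omega), Option.getD_some,
        A_canon arr k dA dA (j + 1) (le_refl dA) (by omega)]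
      cases mx with
      | none =>
        dsimp only
        cases best with
        | none =>
          rw [show j - s + 1 = j + 1 - s from by omega]
          exact ih (j + 1) (by omega) (by omega) _ _
        | some b =>
          dsimp only
          rw [show j - s + 1 = j + 1 - s from by omega]
          exact ih (j + 1) (by omega) (by omega) _ _
      | some x =>
        dsimp only
        cases best with
        | none =>
          rw [show j - s + 1 = j + 1 - s from by omega]
          exact ih (j + 1) (by omega) (by omega) _ _
        | some b =>
          dsimp only
          rw [show j - s + 1 = j + 1 - s from by omega]
          exact ih (j + 1) (by omega) (by omega) _ _
    · rw [PySem.List.pyRange_one_eq_nil (by omega)]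
      rfl

-- one outer step: writing bInner at s preserves the invariant (k ≥ 1 makes the loop nonempty)
theorem step_inv (arr : List Int) (k i s : Int) (dp : List (Option Int))
    (hk : 1 ≤ k) (hs : s < (arr.length : Int)) (hi : i ≤ s)
    (hinv : DpInv arr k i (s + 1) dp) :
    DpInv arr k i s (PySem.List.pySetD dp (s - i) (bInner arr k i dp s)) := by
  obtain ⟨hlen, H⟩ := hinv
  have hb : bInner arr k i dp s = some (Aval arr k s) := by
    unfold bInner
    rw [B_canon arr i s dp]
    rw [inner_rel arr k i s dp (((arr.length : Int) - s).toNat) (le_refl _)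
      (fun u hu1 hu2 => H u (by omega) hu2)
      ((min (s + k) (arr.length : Int) - s).toNat) s (le_refl _) (le_refl s) none none]
    have hsm : s < min (s + k) (arr.length : Int) := by omega
    have hsome := A_fold_isSome arr k (((arr.length : Int) - s).toNat)
      (PySem.List.pyRange s (min (s + k) (arr.length : Int)) 1) none none (s - s)
      (Or.inr (by rw [PySem.List.pyRange_one_cons hsm]; exact List.cons_ne_nil _ _))
    obtain ⟨w, hw⟩ := Option.isSome_iff_exists.mp hsome
    rw [show s - s = (0 : Int) from by omega] at hw ⊢
    rw [hw]
    have hA : Aval arr k s = w := by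
      unfold Aval
      rw [maxSumRecAF, if_neg (by omega), hw]; rfl
    rw [hA]
  have hset : PySem.List.pySetD dp (s - i) (bInner arr k i dp s) =
      dp.set (s - i).toNat (bInner arr k i dp s) :=
    PySem.List.pySetD_of_nonneg _ _ (by omega)
  constructor
  · rw [hset, List.length_set, hlen]
  · intro u hu1 hu2
    rw [hset, PySem.List.pyGetD_of_nonneg _ _ (by omega)]
    by_cases heq : u = s
    · subst heq
      rw [List.getD_eq_getElem?_getD, List.getElem?_set_self (by omega), hb]
      rfl
    · have hne : (s - i).toNat ≠ (u - i).toNat := by omega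
      rw [List.getD_eq_getElem?_getD, List.getElem?_set_ne hne,
        ← List.getD_eq_getElem?_getD, ← PySem.List.pyGetD_of_nonneg _ _ (by omega)]
      exact H u (by omega) hu2

-- the whole countdown loop establishes the invariant down to i
theorem outer_inv (arr : List Int) (k i : Int) (hk : 1 ≤ k) :
    ∀ (d : Nat) (t : Int) (dp : List (Option Int)), (t - (i - 1)).toNat ≤ d →
      i - 1 ≤ t → t < (arr.length : Int) → DpInv arr k i (t + 1) dp →
      DpInv arr k i (i) ((PySem.List.pyRange t (i - 1) (-1)).foldl
        (fun dp s => PySem.List.pySetD dp (s - i) (bInner arr k i dp s)) dp) ∨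
      ((PySem.List.pyRange t (i - 1) (-1)) = [] ∧ t + 1 ≤ i) := by
  intro d
  induction d with
  | zero =>
    intro t dp hd ht1 ht2 hinv
    right
    exact ⟨PySem.List.pyRange_neg_one_eq_nil (by omega), by omega⟩
  | succ d ih =>
    intro t dp hd ht1 ht2 hinv
    by_cases hti : i - 1 < t
    · left
      rw [PySem.List.pyRange_neg_one_cons hti, List.foldl_cons]
      have hstep := step_inv arr k i t dp hk ht2 (by omega) hinv
      rcases ih (t - 1) _ (by omega) (by omega) (by omega)
        (by rw [show t - 1 + 1 = t from by omega]; exact hstep) with h | ⟨hnil, hle⟩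
      · exact h
      · rw [hnil, List.foldl_nil]
        have : t = i := by omega
        subst this
        exact hstep
    · right
      exact ⟨PySem.List.pyRange_neg_one_eq_nil (by omega), by omega⟩

-- ===== VERDICT (by name: the statement is the Claim_ definition above) =====
theorem maxSumRec_spec : Claim_equal_maxSumRec := by
  intro i arr k _ hpre
  unfold Spec_maxSumRec maxSumRec maxSumRec_alt
  by_cases hge : (arr.length : Int) ≤ i
  · rw [if_pos hge, maxSumRecAF, if_pos hge]
  · rw [if_neg hge]
    rcases hpre with h | ⟨hlo, hk⟩
    · exact absurd h hge
    · have hinv0 : DpInv arr k i ((arr.length : Int) - 1 + 1)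
          (List.replicate (((arr.length : Int) - i + 1)).toNat ((some 0) : Option Int)) := by
        constructor
        · exact List.length_replicate
        · intro u hu1 hu2
          have hu : u = (arr.length : Int) := by omega
          subst hu
          rw [PySem.List.pyGetD_of_nonneg _ _ (by omega),
            List.getD_eq_getElem?_getD]
          have : Aval arr k (arr.length : Int) = 0 := by
            unfold Aval
            rw [maxSumRecAF, if_pos (le_refl _)]
          rw [this]
          rw [List.getElem?_replicate]
          split_ifs <;> rfl
      rcases outer_inv arr k i hk (((arr.length : Int) - 1) - (i - 1)).toNat
        ((arr.length : Int) - 1)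
        (List.replicate (((arr.length : Int) - i + 1)).toNat ((some 0) : Option Int))
        (le_refl _) (by omega) (by omega) hinv0 with h | ⟨-, hle⟩
      · obtain ⟨-, H⟩ := h
        have := H i (le_refl i) (by omega)
        rw [show i - i = (0 : Int) from by omega] at this
        dsimp only
        rw [this]
        rfl
      · omega
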